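-- pv_equiv track=rewrite | github.com/akshatg20/sql-parser | utilities.py | index_graduation_year
-- ===== SOURCE A (Python) =====
-- def index_graduation_year(years_with_ids):
--     """
--     Sorts the graduation years and returns two things:
--     1. A list of student IDs sorted by graduation year.
--     2. A dictionary where the keys are unique graduation years and the values are the start index of the corresponding year in the sorted list.
--
--     This method can be used to create an index on graduation year for a list of students.
--
--     :param years_with_ids: List of tuples in the form (graduation_year, student_id)
--     :return: sorted_ids, year_start_index
--     """
--
--     # Sort the list of tuples based on the graduation year (first element of the tuple)
--     sorted_years_with_ids = sorted(years_with_ids, key=lambda x: x[0])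
--
--     # Extract the sorted IDs
--     sorted_ids = [item[1] for item in sorted_years_with_ids]
--
--     # Create a dictionary to track the start index of each unique graduation year
--     year_start_index = {}
--     for i, (year, _) in enumerate(sorted_years_with_ids):
--         if year not in year_start_index:
--             year_start_index[year] = i  # Record the first occurrence of the graduation year
--
--     return sorted_ids, year_start_index
-- ===== SOURCE B (Python) =====
-- def index_graduation_year(years_with_ids):
--     # Single run-scan over the sorted list: each year's start index comes from
--     # the running offset, so no per-element membership test is needed.
--     sp = sorted(years_with_ids, key=lambda x: x[0])
--     sorted_ids = []
--     year_start_index = {}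
--     i, n = 0, len(sp)
--     while i < n:
--         year = sp[i][0]
--         year_start_index[year] = i
--         j = i
--         while j < n and sp[j][0] == year:
--             sorted_ids.append(sp[j][1])
--             j += 1
--         i = j
--     return sorted_ids, year_start_index
-- ===== Notes on version B (the rewrite author's own statement) =====
-- stated objective: alternative
-- what changed: B replaces A's per-element dict-membership test over enumerate(sorted) with a single run-scan of the sorted list: each year's start index is the running offset of its run, and ids are collected run by run.
import Mathlib
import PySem

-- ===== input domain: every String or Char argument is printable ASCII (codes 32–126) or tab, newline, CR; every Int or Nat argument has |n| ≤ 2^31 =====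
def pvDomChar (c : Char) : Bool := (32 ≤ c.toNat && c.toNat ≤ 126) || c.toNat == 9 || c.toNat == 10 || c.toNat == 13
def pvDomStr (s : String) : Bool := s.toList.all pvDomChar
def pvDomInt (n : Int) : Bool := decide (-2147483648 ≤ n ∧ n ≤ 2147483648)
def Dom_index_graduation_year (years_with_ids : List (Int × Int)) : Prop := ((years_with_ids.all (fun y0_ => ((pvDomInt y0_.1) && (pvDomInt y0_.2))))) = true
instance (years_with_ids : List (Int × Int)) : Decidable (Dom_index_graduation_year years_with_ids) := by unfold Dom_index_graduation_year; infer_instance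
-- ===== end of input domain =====

-- B replaces A's per-element dict-membership test over enumerate(sorted list) with a single
-- run-scan of the sorted list (start index = running offset of each run); objective: alternative.

-- ===== PORT A =====
-- sorted(…, key=lambda x: x[0]); sorted_ids comprehension; enumerate loop with 'if year not in dict'
def index_graduation_year (years_with_ids : List (Int × Int)) : List Int × (List (Int × Int)) :=
  let sorted_years_with_ids := PySem.List.sorted years_with_ids (fun x => x.1) false
  let sorted_ids := sorted_years_with_ids.map (fun item => item.2)
  let year_start_index :=
    (PySem.List.enumerate sorted_years_with_ids 0).foldl
      (fun d p => if d.contains p.2.1 then d else d.insert p.2.1 p.1)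
      (PySem.Dict.empty : PySem.Dict Int Int)
  (sorted_ids, year_start_index.items)

-- ===== PORT B =====
-- the outer while-loop of Source B: one recursive step per run of equal years;
-- the inner while-loop (scan ids of the current run) is takeWhile/dropWhile on the same predicate
def pvRunScan : List (Int × Int) → Int → List Int × List (Int × Int)
  | [], _ => ([], [])
  | (year, sid) :: rest, i =>
      let run := rest.takeWhile (fun p => p.1 == year)
      let rest' := rest.dropWhile (fun p => p.1 == year)
      let tail := pvRunScan rest' (i + 1 + run.length)
      (sid :: run.map (fun p => p.2) ++ tail.1, (year, i) :: tail.2)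
  termination_by l => l.length
  decreasing_by
    simp only [List.length_cons]
    exact Nat.lt_succ_of_le (List.length_dropWhile_le _ _)

def index_graduation_year_alt (years_with_ids : List (Int × Int)) : List Int × (List (Int × Int)) :=
  pvRunScan (PySem.List.sorted years_with_ids (fun x => x.1) false) 0

-- ===== PRECONDITION & SPEC =====
def Spec_index_graduation_year (years_with_ids : List (Int × Int)) (out : List Int × (List (Int × Int))) : Prop := out = index_graduation_year_alt years_with_ids
instance (years_with_ids : List (Int × Int)) (out : List Int × (List (Int × Int))) : Decidable (Spec_index_graduation_year years_with_ids out) := by unfold Spec_index_graduation_year; infer_instance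

-- ===== CLAIM (what is proved, stated in full; the proofs are below) =====
def Claim_equal_index_graduation_year : Prop := ∀ (years_with_ids : List (Int × Int)), Dom_index_graduation_year years_with_ids → Spec_index_graduation_year years_with_ids (index_graduation_year years_with_ids)

-- ===== LEMMAS AND PROOFS =====

-- A's enumerate loop leaves the dict unchanged over a stretch of already-present years
theorem pvSkipRun (l : List (Int × (Int × Int))) (d : PySem.Dict Int Int)
    (h : ∀ p ∈ l, d.contains p.2.1 = true) :
    l.foldl (fun d p => if d.contains p.2.1 then d else d.insert p.2.1 p.1) d = d := by
  induction l with
  | nil => rfl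
  | cons x xs ih =>
    simp only [List.foldl_cons, h x (List.mem_cons_self)]
    exact ih (fun p hp => h p (List.mem_cons_of_mem _ hp))

-- main loop invariant: on a key-sorted list all of whose keys exceed every key of d,
-- A's enumerate/membership fold appends exactly the run-scan's index list, and the
-- run-scan's id list is the map of second components
theorem pvMain (n : Nat) (l : List (Int × Int)) (hn : l.length ≤ n) (i : Int) (d : PySem.Dict Int Int)
    (hs : l.Pairwise (fun a b => a.1 ≤ b.1))
    (hd : ∀ p ∈ l, ∀ k ∈ d.keys, k < p.1) :
    ((PySem.List.enumerate l i).foldl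
        (fun d p => if d.contains p.2.1 then d else d.insert p.2.1 p.1) d).items
      = d.items ++ (pvRunScan l i).2
    ∧ (pvRunScan l i).1 = l.map (fun p => p.2) := by
  induction n generalizing l i d with
  | zero =>
    have : l = [] := List.eq_nil_of_length_eq_zero (Nat.le_zero.mp hn)
    subst this
    simp [pvRunScan, PySem.List.enumerate_nil]
  | succ n ih =>
    match l with
    | [] => simp [pvRunScan, PySem.List.enumerate_nil]
    | (year, sid) :: rest =>
      set p : Int × Int → Bool := fun q => q.1 == year with hp
      have hsplit : rest.takeWhile p ++ rest.dropWhile p = rest :=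
        List.takeWhile_append_dropWhile
      -- the head year is fresh in d
      have hyfresh : d.contains year = false := by
        rw [PySem.Dict.contains_eq_decide_mem_keys]
        simp only [decide_eq_false_iff_not]
        intro hy
        exact absurd (hd (year, sid) List.mem_cons_self year hy) (lt_irrefl year)
      -- head of the sorted list bounds everything in rest
      have hhead : ∀ q ∈ rest, year ≤ q.1 := by
        intro q hq; exact (List.pairwise_cons.mp hs).1 q hq
      -- every element of the dropWhile tail has key strictly above year
      have hgt : ∀ q ∈ rest.dropWhile p, year < q.1 := by
        intro q hq
        have hne : rest.dropWhile p ≠ [] := by intro h0; rw [h0] at hq; exact absurd hq (List.not_mem_nil)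
        have hhd := List.head_dropWhile_not p hne
        have hhdmem : (rest.dropWhile p).head hne ∈ rest :=
          (List.dropWhile_sublist p).mem (List.head_mem hne)
        have hhdgt : year < ((rest.dropWhile p).head hne).1 := by
          have h1 := hhead _ hhdmem
          have h2 : ((rest.dropWhile p).head hne).1 ≠ year := by
            simpa [hp] using hhd
          omega
        have hpw : (rest.dropWhile p).Pairwise (fun a b => a.1 ≤ b.1) :=
          List.Pairwise.sublist (List.dropWhile_sublist p) (List.pairwise_cons.mp hs).2
        obtain heq := List.cons_head_tail hne
        rw [← heq, List.mem_cons] at hq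
        rw [← heq] at hpw
        rcases hq with rfl | hmemtail
        · omega
        · have := (List.pairwise_cons.mp hpw).1 q hmemtail
          omega
      -- unfold one enumerate/fold step and one pvRunScan step
      rw [PySem.List.enumerate_cons]
      simp only [List.foldl_cons, hyfresh, Bool.false_eq_true, if_false]
      -- split the remaining enumeration at the run boundary
      have henum : PySem.List.enumerate rest (i + 1)
          = PySem.List.enumerate (rest.takeWhile p) (i + 1)
            ++ PySem.List.enumerate (rest.dropWhile p) (i + 1 + (rest.takeWhile p).length) := by
        conv_lhs => rw [← hsplit]
        exact PySem.List.enumerate_append _ _ _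
      rw [henum, List.foldl_append]
      -- the run is skipped: all its keys are `year`, already inserted
      have hskip : (PySem.List.enumerate (rest.takeWhile p) (i + 1)).foldl
          (fun d p => if d.contains p.2.1 then d else d.insert p.2.1 p.1) (d.insert year i)
          = d.insert year i := by
        apply pvSkipRun
        intro q hq
        rcases (PySem.List.mem_enumerate_iff _ _ _).mp hq with ⟨k, hk, rfl⟩
        have hmem : (rest.takeWhile p)[k] ∈ rest.takeWhile p := List.getElem_mem hk
        have : p ((rest.takeWhile p)[k]) = true := List.mem_takeWhile_imp hmem
        have hy : ((rest.takeWhile p)[k]).1 = year := by simpa [hp] using this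
        simp [hy, PySem.Dict.contains_insert_self]
      rw [hskip]
      -- inductive step on the strictly larger-keyed tail
      have hlen : (rest.dropWhile p).length ≤ n := by
        have h1 := List.length_dropWhile_le p rest
        have h2 : rest.length ≤ n := by simpa using hn
        omega
      have hpw' : (rest.dropWhile p).Pairwise (fun a b => a.1 ≤ b.1) :=
        List.Pairwise.sublist (List.dropWhile_sublist p) (List.pairwise_cons.mp hs).2
      have hd' : ∀ q ∈ rest.dropWhile p, ∀ k ∈ (d.insert year i).keys, k < q.1 := by
        intro q hq k hk
        rcases (PySem.Dict.mem_keys_insert d year k i).mp hk with rfl | hk'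
        · exact hgt q hq
        · exact hd q (List.mem_cons_of_mem _ ((List.dropWhile_sublist p).mem hq)) k hk'
      obtain ⟨hA, hB⟩ := ih (rest.dropWhile p) hlen (i + 1 + (rest.takeWhile p).length)
        (d.insert year i) hpw' hd'
      have hins : (d.insert year i).items = d.items ++ [(year, i)] :=
        PySem.Dict.items_insert_of_not_contains d i hyfresh
      constructor
      · rw [hA, hins, pvRunScan]
        simp [← hp]
      · rw [pvRunScan]
        simp only
        conv_rhs => rw [← hsplit]
        simp [← hp, hB]
        rw [← List.map_append, hsplit]

-- ===== VERDICT (by name: the statement is the Claim_ definition above) =====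
theorem index_graduation_year_spec : Claim_equal_index_graduation_year := by
  intro xs _
  unfold Spec_index_graduation_year index_graduation_year index_graduation_year_alt
  have hs := PySem.List.sorted_pairwise xs (fun x => x.1)
  obtain ⟨hA, hB⟩ := pvMain (PySem.List.sorted xs (fun x => x.1) false).length
    (PySem.List.sorted xs (fun x => x.1) false) le_rfl 0 PySem.Dict.empty hs
    (by intro q _ k hk; simp [PySem.Dict.keys_empty] at hk)
  have hemp : (PySem.Dict.empty : PySem.Dict Int Int).items = [] := rfl
  dsimp only
  rw [hA, hemp, List.nil_append, ← hB]
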